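-- pv_equiv track=rewrite | github.com/blesssong2020/python | advanced_tips.py | practice_1
-- ===== SOURCE A (Python) =====
-- def practice_1(l):
--     my_list = []
--     for i, e in enumerate(l):
--         if i % 2 == 0:
--             my_list.append(e*2)
--         else:
--             my_list.append(e+10)
--     return my_list
-- ===== SOURCE B (Python) =====
-- def practice_1(l):
--     # Two strided views: pair even-index with odd-index elements, no parity test per element.
--     out = []
--     for x, y in zip(l[0::2], l[1::2]):
--         out.append(x * 2)
--         out.append(y + 10)
--     if len(l) % 2:
--         out.append(l[-1] * 2)
--     return out
-- ===== Notes on version B (the rewrite author's own statement) =====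
-- stated objective: alternative
-- what changed: Instead of one enumerate loop testing i % 2 per element, B zips the two strided slices l[0::2] and l[1::2], emits a doubled/plus-10 pair per zip step, and appends the doubled last element when the length is odd.
import Mathlib
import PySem

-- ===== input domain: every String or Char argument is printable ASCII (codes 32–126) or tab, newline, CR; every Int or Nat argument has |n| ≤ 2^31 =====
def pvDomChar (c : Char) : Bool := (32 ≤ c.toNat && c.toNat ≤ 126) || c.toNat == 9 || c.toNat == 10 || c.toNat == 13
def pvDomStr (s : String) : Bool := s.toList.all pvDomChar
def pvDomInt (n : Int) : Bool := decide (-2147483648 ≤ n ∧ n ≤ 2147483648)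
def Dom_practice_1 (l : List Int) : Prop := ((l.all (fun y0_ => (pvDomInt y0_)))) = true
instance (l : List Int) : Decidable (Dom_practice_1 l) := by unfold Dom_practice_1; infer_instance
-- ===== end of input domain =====

-- ===== PORT A =====
def practice_1 (l : List Int) : List Int :=
  (PySem.List.enumerate l).foldl
    (fun my_list ie =>
      if PySem.Int.mod ie.1 2 == 0 then my_list ++ [ie.2 * 2] else my_list ++ [ie.2 + 10]) []

-- ===== PORT B =====
-- hand port of the step-2 slice xs[0::2] (PySem has no stepped slices); exact on all lists
def pvStride2 : List Int → List Int
  | [] => []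
  | [x] => [x]
  | x :: _ :: rest => x :: pvStride2 rest

-- B: zip the slices l[0::2] and l[1::2] (= [0::2] of l[1:]), emit a pair per zip step,
-- append the doubled last element (l[-1], ported as pyGetD, reached only when l ≠ []) if the length is odd
def practice_1_alt (l : List Int) : List Int :=
  let out := ((pvStride2 l).zip (pvStride2 (PySem.List.slice l (some 1) none))).foldl
      (fun out xy => out ++ [xy.1 * 2, xy.2 + 10]) []
  if l.length % 2 == 1 then out ++ [PySem.List.pyGetD l (-1) 0 * 2] else out

-- ===== PRECONDITION & SPEC =====
def Spec_practice_1 (l : List Int) (out : List Int) : Prop := out = practice_1_alt l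
instance (l : List Int) (out : List Int) : Decidable (Spec_practice_1 l out) := by unfold Spec_practice_1; infer_instance

-- ===== CLAIM (what is proved, stated in full; the proofs are below) =====
def Claim_equal_practice_1 : Prop := ∀ (l : List Int), Dom_practice_1 l → Spec_practice_1 l (practice_1 l)

-- ===== LEMMAS AND PROOFS =====

-- proof-side helper: the interleaved result as a single two-step recursion
def pvPairRec : List Int → List Int
  | [] => []
  | [x] => [x * 2]
  | x :: y :: rest => x * 2 :: (y + 10) :: pvPairRec rest

-- loop invariant for A's fold, tracked by the parity of the start index
theorem practice_1_fold (l : List Int) : ∀ (s : Int) (acc : List Int), s % 2 = 0 →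
    (PySem.List.enumerate l s).foldl
      (fun my_list ie =>
        if PySem.Int.mod ie.1 2 == 0 then my_list ++ [ie.2 * 2] else my_list ++ [ie.2 + 10]) acc
      = acc ++ pvPairRec l := by
  induction l using pvPairRec.induct with
  | case1 => intro s acc _; simp [PySem.List.enumerate_nil, pvPairRec]
  | case2 x =>
      intro s acc hs
      have hm0 : (PySem.Int.mod s 2 == 0) = true := by
        rw [PySem.Int.mod_eq_emod_of_pos (by norm_num)]; simp; omega
      rw [PySem.List.enumerate_cons, List.foldl_cons, PySem.List.enumerate_nil, List.foldl_nil]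
      simp only [hm0, if_true, pvPairRec]
  | case3 x y rest ih =>
      intro s acc hs
      have hm0 : (PySem.Int.mod s 2 == 0) = true := by
        rw [PySem.Int.mod_eq_emod_of_pos (by norm_num)]; simp; omega
      have hm1 : (PySem.Int.mod (s + 1) 2 == 0) = false := by
        rw [PySem.Int.mod_eq_emod_of_pos (by norm_num)]; simp; omega
      have h2 : (s + 1 + 1) % 2 = 0 := by omega
      rw [PySem.List.enumerate_cons, List.foldl_cons, PySem.List.enumerate_cons, List.foldl_cons]
      simp only [hm0, hm1, if_true, Bool.false_eq_true, if_false]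
      rw [ih _ _ h2, pvPairRec]
      simp

theorem pvStride2_cons (y : Int) (rest : List Int) :
    pvStride2 (y :: rest) = y :: pvStride2 rest.tail := by
  cases rest with
  | nil => rfl
  | cons z rs => rfl

theorem practice_1_alt_cons_cons (x y : Int) (rest : List Int) :
    practice_1_alt (x :: y :: rest) = x * 2 :: (y + 10) :: practice_1_alt rest := by
  unfold practice_1_alt
  rw [PySem.List.slice_from_one, PySem.List.slice_from_one]
  simp only [List.tail_cons]
  rw [show pvStride2 (x :: y :: rest) = x :: pvStride2 rest from rfl, pvStride2_cons,
      List.zip_cons_cons, PySem.List.foldl_append_eq_flatMap, PySem.List.foldl_append_eq_flatMap]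
  have hl2 : (x :: y :: rest).length % 2 = rest.length % 2 := by
    simp only [List.length_cons]; omega
  rw [hl2]
  by_cases hp : rest.length % 2 = 1
  · have hne : rest ≠ [] := by
      intro hc; subst hc; simp at hp
    have hne2 : (y :: rest) ≠ [] := by simp
    rw [if_pos (by simp [hp]), if_pos (by simp [hp]),
        PySem.List.pyGetD_neg_one (xs := x :: y :: rest) (h := by simp),
        PySem.List.pyGetD_neg_one (xs := rest) (h := hne),
        List.getLast_cons hne2, List.getLast_cons hne]
    simp
  · rw [if_neg (by simp [hp]), if_neg (by simp [hp])]
    simp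

theorem practice_1_alt_eq_pairRec (l : List Int) : practice_1_alt l = pvPairRec l := by
  induction l using pvPairRec.induct with
  | case1 => rfl
  | case2 x =>
      simp [practice_1_alt, pvStride2, pvPairRec, PySem.List.slice_from_one,
            PySem.List.pyGetD_neg_one (xs := [x]) (h := by simp)]
  | case3 x y rest ih =>
      rw [practice_1_alt_cons_cons, ih, pvPairRec]

theorem practice_1_spec : Claim_equal_practice_1 := by
  intro l _
  unfold Spec_practice_1 practice_1
  rw [practice_1_alt_eq_pairRec]
  simpa using practice_1_fold l 0 [] rfl
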